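-- pv_equiv track=rewrite | github.com/jordan-hodges/Multi-Genome-Alignment-Pipeline | blast_tools.py | get_total_length_and_longest_region
-- ===== SOURCE A (Python) =====
-- def get_total_length_and_longest_region(regions):
--
-- 	total_length = 0
-- 	max_length   = 0
-- 	longest_region = None
-- 	for (s,e) in regions:
-- 		length = 0
-- 		if e>s: length=(e-s)
-- 		else:	length=(s-e)
--
-- 		total_length += length
-- 		if length > max_length:
-- 			max_length = length
-- 			longest_region = (s,e)
--
-- 	return total_length, longest_region
-- ===== SOURCE B (Python) =====
-- def get_total_length_and_longest_region(regions):
-- 	lengths = [abs(e - s) for s, e in regions]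
-- 	total = sum(lengths)
-- 	ranked = sorted(regions, key=lambda r: abs(r[1] - r[0]), reverse=True)
-- 	if ranked and ranked[0][0] != ranked[0][1]:
-- 		return total, ranked[0]
-- 	return total, None
-- ===== Notes on version B (the rewrite author's own statement) =====
-- stated objective: alternative
-- what changed: Replaces A's fused running-total/running-max accumulator loop with a stable descending sort by region length and taking the head of the sorted list (stability gives the first maximal region; a zero-length head means no positive-length region, so None), with the total summed from a separate list of lengths.
import Mathlib
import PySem

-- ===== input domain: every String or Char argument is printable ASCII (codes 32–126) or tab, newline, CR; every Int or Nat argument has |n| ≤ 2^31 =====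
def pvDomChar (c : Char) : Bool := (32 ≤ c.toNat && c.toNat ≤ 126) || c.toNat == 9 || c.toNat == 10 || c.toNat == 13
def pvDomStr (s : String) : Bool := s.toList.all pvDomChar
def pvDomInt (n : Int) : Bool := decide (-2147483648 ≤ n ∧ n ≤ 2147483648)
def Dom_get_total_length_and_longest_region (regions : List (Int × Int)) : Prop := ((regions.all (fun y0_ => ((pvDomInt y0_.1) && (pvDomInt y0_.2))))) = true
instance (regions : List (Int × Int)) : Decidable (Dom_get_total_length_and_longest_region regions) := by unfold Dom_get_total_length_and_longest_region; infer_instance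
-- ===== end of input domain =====

-- B replaces A's fused running-max loop by a stable descending sort by region length, taking the head (stability yields the first maximal region); same return value, different algorithm.

-- ===== PORT A =====
def get_total_length_and_longest_region (regions : List (Int × Int)) : Int × (Option (Int × Int)) :=
  let st := regions.foldl
    (fun (acc : Int × Int × Option (Int × Int)) (se : Int × Int) =>
      let s := se.1
      let e := se.2
      let length : Int := if e > s then e - s else s - e
      let total := acc.1 + length
      if length > acc.2.1 then (total, length, some (s, e)) else (total, acc.2.1, acc.2.2))
    ((0 : Int), (0 : Int), (none : Option (Int × Int)))
  (st.1, st.2.2)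

-- ===== PORT B =====
def get_total_length_and_longest_region_alt (regions : List (Int × Int)) : Int × (Option (Int × Int)) :=
  let lengths := regions.map (fun r => |r.2 - r.1|)
  let total := lengths.sum
  let ranked := PySem.List.sorted regions (fun r => |r.2 - r.1|) true
  match ranked with
  | [] => (total, none)
  | m :: _ => if m.1 ≠ m.2 then (total, some m) else (total, none)

-- ===== PRECONDITION & SPEC =====
def Spec_get_total_length_and_longest_region (regions : List (Int × Int)) (out : Int × (Option (Int × Int))) : Prop := out = get_total_length_and_longest_region_alt regions
instance (regions : List (Int × Int)) (out : Int × (Option (Int × Int))) : Decidable (Spec_get_total_length_and_longest_region regions out) := by unfold Spec_get_total_length_and_longest_region; infer_instance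

-- ===== CLAIM =====
def Claim_equal_get_total_length_and_longest_region : Prop := ∀ (regions : List (Int × Int)), Dom_get_total_length_and_longest_region regions → Spec_get_total_length_and_longest_region regions (get_total_length_and_longest_region regions)

-- ===== LEMMAS AND PROOFS =====

-- the head-register update performed by one stable descending insertion
def pvHStep (h : Option (Int × Int)) (x : Int × Int) : Option (Int × Int) :=
  match h with
  | none => some x
  | some m => if |m.2 - m.1| < |x.2 - x.1| then some x else some m

-- A's running-max length as a function of the head register
def pvKOf : Option (Int × Int) → Int
  | none => 0
  | some m => |m.2 - m.1|

-- A's longest-region register as a function of the head register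
def pvPosOf : Option (Int × Int) → Option (Int × Int)
  | none => none
  | some m => if 0 < |m.2 - m.1| then some m else none

-- head of one stable descending insertion
lemma pv_head_ins (x : Int × Int) (acc : List (Int × Int)) :
    (PySem.List.insertBy (fun a b => decide ((|b.2 - b.1| : Int) < |a.2 - a.1|)) x acc).head?
      = pvHStep acc.head? x := by
  cases acc with
  | nil => simp [PySem.List.insertBy, pvHStep]
  | cons y ys =>
    simp only [PySem.List.insertBy, pvHStep, List.head?_cons]
    by_cases h : (|y.2 - y.1| : Int) < |x.2 - x.1| <;> simp [h]

-- head of the insertion fold = the head-register fold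
lemma pv_head_foldl (xs : List (Int × Int)) : ∀ (acc : List (Int × Int)),
    (List.foldl (fun acc x => PySem.List.insertBy (fun a b => decide ((|b.2 - b.1| : Int) < |a.2 - a.1|)) x acc) acc xs).head?
      = xs.foldl pvHStep acc.head? := by
  induction xs with
  | nil => intro acc; rfl
  | cons x t ih =>
    intro acc
    simp only [List.foldl_cons]
    rw [ih, pv_head_ins]

-- A's fused loop, started from a state coded by the head register h, computes
-- (running total + sum of lengths, the coded state of the updated head register)
lemma pv_loop_inv (xs : List (Int × Int)) : ∀ (t : Int) (h : Option (Int × Int)),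
    xs.foldl
      (fun (acc : Int × Int × Option (Int × Int)) (se : Int × Int) =>
        let s := se.1
        let e := se.2
        let length : Int := if e > s then e - s else s - e
        let total := acc.1 + length
        if length > acc.2.1 then (total, length, some (s, e)) else (total, acc.2.1, acc.2.2))
      (t, pvKOf h, pvPosOf h)
    = (t + (xs.map (fun r => |r.2 - r.1|)).sum,
       pvKOf (xs.foldl pvHStep h), pvPosOf (xs.foldl pvHStep h)) := by
  induction xs with
  | nil => intro t h; simp
  | cons x xs ih =>
    intro t h
    obtain ⟨s, e⟩ := x
    have hlen : (if ((s, e) : Int × Int).2 > ((s, e) : Int × Int).1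
        then ((s, e) : Int × Int).2 - ((s, e) : Int × Int).1
        else ((s, e) : Int × Int).1 - ((s, e) : Int × Int).2) = |e - s| := by
      by_cases hc : s < e
      · rw [if_pos hc, abs_of_pos (show (0:Int) < e - s by omega)]
      · rw [if_neg hc, abs_of_nonpos (show e - s ≤ 0 by omega)]; ring
    simp only [List.foldl_cons, List.map_cons, List.sum_cons, hlen]
    cases h with
    | none =>
      have hstep : List.foldl pvHStep (pvHStep none (s, e)) xs
          = List.foldl pvHStep (some (s, e)) xs := rfl
      by_cases hpos : (0:Int) < |e - s|
      · rw [if_pos (by simpa [pvKOf] using hpos)]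
        have ih' := ih (t + |e - s|) (some (s, e))
        rw [show pvPosOf (some ((s, e) : Int × Int)) = some (s, e) from by
              simp [pvPosOf, hpos],
            show pvKOf (some ((s, e) : Int × Int)) = |e - s| from by simp [pvKOf]] at ih'
        rw [ih', hstep]
        rw [Prod.mk.injEq]; exact ⟨by ring, rfl⟩
      · have h0 : |e - s| = 0 := le_antisymm (by omega) (abs_nonneg _)
        rw [if_neg (by simpa [pvKOf] using hpos)]
        have ih' := ih (t + |e - s|) (some (s, e))
        rw [show pvPosOf (some ((s, e) : Int × Int)) = none from by simp [pvPosOf, h0],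
            show pvKOf (some ((s, e) : Int × Int)) = 0 from by simp [pvKOf, h0]] at ih'
        rw [show pvKOf (none : Option (Int × Int)) = 0 from rfl,
            show pvPosOf (none : Option (Int × Int)) = none from rfl, hstep]
        rw [ih']
        rw [Prod.mk.injEq]; exact ⟨by ring, rfl⟩
    | some m =>
      by_cases hup : |m.2 - m.1| < |e - s|
      · have hstep : List.foldl pvHStep (pvHStep (some m) (s, e)) xs
            = List.foldl pvHStep (some (s, e)) xs := by
          simp [pvHStep, hup]
        have hpos : (0:Int) < |e - s| := lt_of_le_of_lt (abs_nonneg _) hup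
        rw [if_pos (by simpa [pvKOf] using hup)]
        have ih' := ih (t + |e - s|) (some (s, e))
        rw [show pvPosOf (some ((s, e) : Int × Int)) = some (s, e) from by
              simp [pvPosOf, hpos],
            show pvKOf (some ((s, e) : Int × Int)) = |e - s| from by simp [pvKOf]] at ih'
        rw [ih', hstep]
        rw [Prod.mk.injEq]; exact ⟨by ring, rfl⟩
      · have hstep : List.foldl pvHStep (pvHStep (some m) (s, e)) xs
            = List.foldl pvHStep (some m) xs := by
          simp [pvHStep, hup]
        rw [if_neg (by simpa [pvKOf] using hup)]
        rw [ih (t + |e - s|) (some m), hstep]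
        rw [Prod.mk.injEq]; exact ⟨by ring, rfl⟩

-- ===== VERDICT =====
theorem get_total_length_and_longest_region_spec : Claim_equal_get_total_length_and_longest_region := by
  intro regions _
  unfold Spec_get_total_length_and_longest_region
  unfold get_total_length_and_longest_region get_total_length_and_longest_region_alt
  rw [PySem.List.sorted_rev_eq_foldl_insertBy]
  have hA := pv_loop_inv regions 0 none
  simp only [pvKOf, pvPosOf] at hA
  simp only [hA]
  have hhead := pv_head_foldl regions []
  simp only [List.head?_nil] at hhead
  cases hsort : List.foldl (fun acc x => PySem.List.insertBy (fun a b => decide ((|b.2 - b.1| : Int) < |a.2 - a.1|)) x acc) [] regions with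
  | nil =>
    rw [hsort] at hhead
    simp only [List.head?_nil] at hhead
    rw [← hhead]
    simp
  | cons m t =>
    rw [hsort] at hhead
    simp only [List.head?_cons] at hhead
    rw [← hhead]
    by_cases hm : m.1 = m.2
    · have h0 : |m.2 - m.1| = 0 := by rw [hm]; simp
      simp [hm]
    · have hpos : (0:Int) < |m.2 - m.1| := abs_pos.mpr (by omega)
      simp [hpos, hm]
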